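-- pv_equiv track=rewrite | github.com/SHARKEE17/HelpMeRead | backend_django/core/services/reading_order.py | _sort_reading_order
-- ===== SOURCE A (Python) =====
-- from typing import List, Dict, Optional, Tuple
--
-- def _sort_reading_order(
--     full_width: List[Dict],
--     column_blocks: List[List[Dict]],
-- ) -> List[Dict]:
--     """
--     Merge full-width blocks and column blocks into final reading order.
--
--     Strategy:
--     - Sort each column's blocks top-to-bottom
--     - Interleave full-width blocks at correct y-positions
--     - Within each "band" between full-width blocks, read columns left-to-right
--     """
--     # Sort each column top-to-bottom
--     for col in column_blocks:
--         col.sort(key=lambda b: b["y0"])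
--
--     # Sort full-width blocks by y-position
--     full_width.sort(key=lambda b: b["y0"])
--
--     if not full_width:
--         # No full-width blocks: just read columns left-to-right, each top-to-bottom
--         result = []
--         for col in column_blocks:
--             result.extend(col)
--         return result
--
--     # Interleave: split column content at full-width block y-positions
--     result = []
--     fw_idx = 0
--
--     # Collect all column blocks into a single list with column index
--     all_col_blocks = []
--     for col_idx, col in enumerate(column_blocks):
--         for block in col:
--             all_col_blocks.append((col_idx, block))
--
--     # Sort by y0, then by column index for tie-breaking
--     all_col_blocks.sort(key=lambda x: (x[1]["y0"], x[0]))
--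
--     col_ptr = 0
--     for fw_block in full_width:
--         # Add all column blocks that come before this full-width block
--         while col_ptr < len(all_col_blocks) and all_col_blocks[col_ptr][1]["y0"] < fw_block["y0"]:
--             result.append(all_col_blocks[col_ptr][1])
--             col_ptr += 1
--         result.append(fw_block)
--
--     # Add remaining column blocks after last full-width block
--     while col_ptr < len(all_col_blocks):
--         result.append(all_col_blocks[col_ptr][1])
--         col_ptr += 1
--
--     return result
-- ===== SOURCE B (Python) =====
-- from typing import List, Dict
--
-- def _sort_reading_order(
--     full_width: List[Dict],
--     column_blocks: List[List[Dict]],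
-- ) -> List[Dict]:
--     """One stable sort over tagged blocks instead of a two-pointer merge.
--
--     Performs the same in-place sorts of each column and of full_width as the
--     original. Full-width blocks get sort key (y0, 0) and column blocks key
--     (y0, 1); since the sort is stable, equal keys keep insertion order
--     (full-width first, then columns left-to-right, each top-to-bottom),
--     which reproduces the merge's strict-less rule exactly.
--     """
--     for col in column_blocks:
--         col.sort(key=lambda b: b["y0"])
--     full_width.sort(key=lambda b: b["y0"])
--
--     if not full_width:
--         return [b for col in column_blocks for b in col]
--
--     tagged = [(b["y0"], 0, b) for b in full_width]
--     tagged += [(b["y0"], 1, b) for col in column_blocks for b in col]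
--     tagged.sort(key=lambda t: (t[0], t[1]))
--     return [t[2] for t in tagged]
-- ===== Notes on version B (the rewrite author's own statement) =====
-- stated objective: alternative
-- what changed: The interleaving of full-width and column blocks is computed by one stable sort of all blocks tagged with a (y0, type-rank) key instead of A's two-pointer merge over a separately built and sorted (col_idx, block) list.
import Mathlib
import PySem

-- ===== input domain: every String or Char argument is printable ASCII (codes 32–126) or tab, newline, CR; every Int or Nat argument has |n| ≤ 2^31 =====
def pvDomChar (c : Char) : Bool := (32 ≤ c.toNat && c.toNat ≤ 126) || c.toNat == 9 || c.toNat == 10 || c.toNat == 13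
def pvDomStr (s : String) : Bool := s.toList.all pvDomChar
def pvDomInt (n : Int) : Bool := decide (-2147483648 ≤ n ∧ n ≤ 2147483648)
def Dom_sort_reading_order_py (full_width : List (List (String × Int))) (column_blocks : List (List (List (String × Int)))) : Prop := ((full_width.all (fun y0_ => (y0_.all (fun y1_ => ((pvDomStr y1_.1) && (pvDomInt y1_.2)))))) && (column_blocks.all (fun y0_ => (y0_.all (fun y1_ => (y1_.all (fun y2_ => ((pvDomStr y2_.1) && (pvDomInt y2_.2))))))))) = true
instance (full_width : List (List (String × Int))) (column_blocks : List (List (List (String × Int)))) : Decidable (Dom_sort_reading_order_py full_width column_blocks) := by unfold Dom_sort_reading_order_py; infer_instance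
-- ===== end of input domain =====

-- B replaces A's two-pointer merge by ONE stable sort of all blocks tagged (y0, type-rank);
-- same cost class ("alternative"); both Pythons sort full_width and each column in place —
-- the equivalence proved here is about the RETURN value, and Source B performs the same mutations.

-- ===== PORT A =====
-- b["y0"]: total stand-in via getD; Pre_ guarantees the key is present, where getD equals Python's lookup
def pvY (b : List (String × Int)) : Int := PySem.Dict.getD (PySem.Dict.mk b) "y0" 0

-- the inner 'while col_ptr < len(all_col_blocks) and ...y0 < fw_block["y0"]' loop
def pvInnerA (v : Int) : List (Int × List (String × Int)) → List (List (String × Int)) →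
    (List (List (String × Int)) × List (Int × List (String × Int)))
  | [], acc => (acc, [])
  | c :: t, acc => if pvY c.2 < v then pvInnerA v t (acc ++ [c.2]) else (acc, c :: t)

-- the 'for fw_block in full_width' loop followed by the trailing while
def pvOuterA : List (List (String × Int)) → List (Int × List (String × Int)) →
    List (List (String × Int)) → List (List (String × Int))
  | [], cs, acc => cs.foldl (fun a c => a ++ [c.2]) acc
  | f :: fs, cs, acc =>
      let p := pvInnerA (pvY f) cs acc
      pvOuterA fs p.2 (p.1 ++ [f])

def sort_reading_order_py (full_width : List (List (String × Int))) (column_blocks : List (List (List (String × Int)))) : List (List (String × Int)) :=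
  let colsS := column_blocks.map (fun col => PySem.List.sorted col pvY)
  let fwS := PySem.List.sorted full_width pvY
  if fwS = [] then
    colsS.foldl (fun acc col => acc ++ col) []
  else
    let allCol := (PySem.List.enumerate colsS 0).foldl
      (fun acc p => p.2.foldl (fun a b => a ++ [(p.1, b)]) acc) []
    let csorted := PySem.List.sorted2 allCol (fun x => pvY x.2) (fun x => x.1)
    pvOuterA fwS csorted []

-- ===== PORT B =====
def sort_reading_order_py_alt (full_width : List (List (String × Int))) (column_blocks : List (List (List (String × Int)))) : List (List (String × Int)) :=
  let colsS := column_blocks.map (fun col => PySem.List.sorted col pvY)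
  let fwS := PySem.List.sorted full_width pvY
  if fwS = [] then
    colsS.flatMap (fun col => col)
  else
    let tagged := fwS.map (fun b => (pvY b, (0 : Int), b)) ++
      colsS.flatMap (fun col => col.map (fun b => (pvY b, (1 : Int), b)))
    (PySem.List.sorted2 tagged (fun t => t.1) (fun t => t.2.1)).map (fun t => t.2.2)

-- ===== PRECONDITION & SPEC =====
-- Pre_: every block dict has a "y0" key — exactly where Python's b["y0"] does not raise KeyError
def Pre_sort_reading_order_py (full_width : List (List (String × Int))) (column_blocks : List (List (List (String × Int)))) : Prop :=
  (full_width.all (fun b => b.any (fun p => p.1 == "y0")) &&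
   column_blocks.all (fun col => col.all (fun b => b.any (fun p => p.1 == "y0")))) = true
instance (full_width : List (List (String × Int))) (column_blocks : List (List (List (String × Int)))) : Decidable (Pre_sort_reading_order_py full_width column_blocks) := by unfold Pre_sort_reading_order_py; infer_instance

def pvWitness_sort_reading_order_py : (List (List (String × Int))) × (List (List (List (String × Int)))) :=
  ([[("y0", 5)]], [[[("y0", 2)], [("y0", 9)]], [[("y0", 3)]]])

def Spec_sort_reading_order_py (full_width : List (List (String × Int))) (column_blocks : List (List (List (String × Int)))) (out : List (List (String × Int))) : Prop := out = sort_reading_order_py_alt full_width column_blocks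
instance (full_width : List (List (String × Int))) (column_blocks : List (List (List (String × Int)))) (out : List (List (String × Int))) : Decidable (Spec_sort_reading_order_py full_width column_blocks out) := by unfold Spec_sort_reading_order_py; infer_instance

-- ===== CLAIM (what is proved, stated in full; the proofs are below) =====
def Claim_equal_sort_reading_order_py : Prop := ∀ (full_width : List (List (String × Int))) (column_blocks : List (List (List (String × Int)))), Dom_sort_reading_order_py full_width column_blocks → Pre_sort_reading_order_py full_width column_blocks → Spec_sort_reading_order_py full_width column_blocks (sort_reading_order_py full_width column_blocks)

-- ===== LEMMAS AND PROOFS =====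

-- tagged blocks carried with their position in the tagged list; strict composite sort key
def pvKZ (e : Int × (Int × Int × List (String × Int))) : Int ×ₗ Int := toLex (e.2.1, e.1)

-- the comparator sorted2 really uses
def pvLt2 {γ : Type} (k1 k2 : γ → Int) (a b : γ) : Bool :=
  decide (k1 a < k1 b) || (!decide (k1 b < k1 a) && decide (k2 a < k2 b))

lemma pvSorted2_eq {γ : Type} (k1 k2 : γ → Int) (xs : List γ) :
    PySem.List.sorted2 xs k1 k2 =
      xs.foldl (fun acc x => PySem.List.insertBy (pvLt2 k1 k2) x acc) [] := rfl

lemma pvMap_insertBy {α β : Type} (f : α → β) (B : α → α → Bool) (B' : β → β → Bool)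
    (p : α) (acc : List α) (h : ∀ q ∈ acc, B' (f p) (f q) = B p q) :
    (PySem.List.insertBy B p acc).map f = PySem.List.insertBy B' (f p) (acc.map f) := by
  induction acc with
  | nil => rfl
  | cons q t ih =>
    have e1 : PySem.List.insertBy B p (q :: t)
        = if B p q then p :: q :: t else q :: PySem.List.insertBy B p t := rfl
    have e2 : PySem.List.insertBy B' (f p) (f q :: t.map f)
        = if B' (f p) (f q) then f p :: f q :: t.map f
          else f q :: PySem.List.insertBy B' (f p) (t.map f) := rfl
    have hq := h q (List.mem_cons_self ..)
    by_cases hb : B p q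
    · simp [e1, e2, hb, hq]
    · simp [e1, e2, hb, hq, ih (fun x hx => h x (List.mem_cons_of_mem _ hx))]

lemma pvFoldl_insertBy_map {γ : Type} (k1 k2 : γ → Int) :
    ∀ (xs acc : List (Int × γ)),
      xs.Pairwise (fun p q => k2 p.2 ≤ k2 q.2 ∧ p.1 < q.1) →
      (∀ q ∈ acc, ∀ p ∈ xs, k2 q.2 ≤ k2 p.2 ∧ q.1 < p.1) →
      (xs.foldl (fun a p => PySem.List.insertBy
          (fun u v => decide ((toLex (k1 u.2, u.1) : Int ×ₗ Int) < toLex (k1 v.2, v.1))) p a) acc).map Prod.snd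
        = xs.foldl (fun a p => PySem.List.insertBy (pvLt2 k1 k2) p.2 a) (acc.map Prod.snd) := by
  intro xs
  induction xs with
  | nil => intro acc _ _; simp
  | cons p xs ih =>
    intro acc hpair hacc
    obtain ⟨hp, hpair'⟩ := List.pairwise_cons.mp hpair
    simp only [List.foldl_cons]
    have hcong : ∀ q ∈ acc, pvLt2 k1 k2 p.2 q.2
        = (fun u v => decide ((toLex (k1 u.2, u.1) : Int ×ₗ Int) < toLex (k1 v.2, v.1))) p q := by
      intro q hq
      obtain ⟨h1, h2⟩ := hacc q hq p (List.mem_cons_self ..)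
      rw [Bool.eq_iff_iff]
      simp only [pvLt2, Bool.or_eq_true, Bool.and_eq_true, Bool.not_eq_true',
        decide_eq_true_eq, decide_eq_false_iff_not, Prod.Lex.toLex_lt_toLex]
      omega
    have hside : ∀ q ∈ PySem.List.insertBy
        (fun u v => decide ((toLex (k1 u.2, u.1) : Int ×ₗ Int) < toLex (k1 v.2, v.1))) p acc,
        ∀ r ∈ xs, k2 q.2 ≤ k2 r.2 ∧ q.1 < r.1 := by
      intro q hq r hr
      rcases (PySem.List.mem_insertBy _ p q acc).mp hq with h | h
      · subst h; exact hp r hr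
      · exact hacc q h r (List.mem_cons_of_mem _ hr)
    rw [ih _ hpair' hside, pvMap_insertBy Prod.snd _ _ p acc hcong]

lemma pvFoldl_enumerate {α β : Type} (g : β → α → β) (xs : List α) (s : Int) (init : β) :
    (PySem.List.enumerate xs s).foldl (fun a p => g a p.2) init = xs.foldl g init := by
  induction xs generalizing s init with
  | nil => rfl
  | cons x t ih => simp [PySem.List.enumerate_cons, ih]

-- a stable two-key sort IS the strict sort of the enumerated list, projected
lemma pvSorted2_char {γ : Type} (k1 k2 : γ → Int) (xs : List γ)
    (h2 : xs.Pairwise (fun a b => k2 a ≤ k2 b)) :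
    PySem.List.sorted2 xs k1 k2 =
      (PySem.List.sorted (PySem.List.enumerate xs 0)
        (fun p => (toLex (k1 p.2, p.1) : Int ×ₗ Int))).map Prod.snd := by
  have h2' : (PySem.List.enumerate xs 0).Pairwise (fun p q => k2 p.2 ≤ k2 q.2) := by
    exact (List.pairwise_map (l := PySem.List.enumerate xs 0) (f := fun x => x.2)
      (R := fun a b => k2 a ≤ k2 b)).mp (by rw [PySem.List.map_snd_enumerate xs 0]; exact h2)
  have hpair := h2'.and (PySem.List.pairwise_lt_enumerate xs 0)
  rw [pvSorted2_eq, PySem.List.sorted_eq_foldl_insertBy,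
      pvFoldl_insertBy_map k1 k2 (PySem.List.enumerate xs 0) [] hpair (by simp),
      List.map_nil]
  exact (pvFoldl_enumerate _ xs 0 []).symm

lemma pvSorted_enum_strict {γ : Type} (k1 : γ → Int) (xs : List γ) :
    (PySem.List.sorted (PySem.List.enumerate xs 0)
        (fun p => (toLex (k1 p.2, p.1) : Int ×ₗ Int))).Pairwise
      (fun p q => (toLex (k1 p.2, p.1) : Int ×ₗ Int) < toLex (k1 q.2, q.1)) := by
  have hperm := PySem.List.sorted_perm (PySem.List.enumerate xs 0)
    (fun p => (toLex (k1 p.2, p.1) : Int ×ₗ Int)) false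
  have hnd : (PySem.List.enumerate xs 0).Nodup :=
    (PySem.List.pairwise_lt_enumerate xs 0).imp (fun h he => by subst he; exact lt_irrefl _ h)
  have hinj : ∀ p ∈ PySem.List.enumerate xs 0, ∀ q ∈ PySem.List.enumerate xs 0,
      p.1 = q.1 → p = q := by
    intro p hp q hq h1
    obtain ⟨k, hk, hpk⟩ := (PySem.List.mem_enumerate_iff xs 0 p).mp hp
    obtain ⟨m, hm, hqm⟩ := (PySem.List.mem_enumerate_iff xs 0 q).mp hq
    subst hpk; subst hqm
    simp only [Prod.mk.injEq] at h1 ⊢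
    have : k = m := by omega
    subst this; exact ⟨rfl, rfl⟩
  have hle := PySem.List.sorted_pairwise (PySem.List.enumerate xs 0)
    (fun p => (toLex (k1 p.2, p.1) : Int ×ₗ Int))
  have hndL : (PySem.List.sorted (PySem.List.enumerate xs 0)
      (fun p => (toLex (k1 p.2, p.1) : Int ×ₗ Int))).Nodup := hperm.nodup_iff.mpr hnd
  refine (hle.and hndL).imp_of_mem ?_
  intro a b ha hb ⟨h1, h2⟩
  refine lt_of_le_of_ne h1 (fun he => h2 ?_)
  have ha' := (PySem.List.mem_sorted ..).mp ha
  have hb' := (PySem.List.mem_sorted ..).mp hb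
  have : (k1 a.2, a.1) = (k1 b.2, b.1) := by
    have := congrArg (fun z => ofLex z) he
    simpa using this
  exact hinj a ha' b hb' (congrArg Prod.snd this)

lemma pvEnumerate_map {α β : Type} (f : α → β) (xs : List α) :
    ∀ s, PySem.List.enumerate (xs.map f) s = (PySem.List.enumerate xs s).map (fun p => (p.1, f p.2)) := by
  induction xs with
  | nil => intro s; rfl
  | cons x t ih => intro s; simp [PySem.List.enumerate_cons, ih]

lemma pvEnumerate_shift {α : Type} (xs : List α) :
    ∀ n s, PySem.List.enumerate xs (n + s) = (PySem.List.enumerate xs s).map (fun p => (p.1 + n, p.2)) := by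
  induction xs with
  | nil => intro n s; rfl
  | cons x t ih =>
    intro n s
    simp only [PySem.List.enumerate_cons, List.map_cons]
    refine congrArg₂ _ (by simp [Int.add_comm]) ?_
    rw [show n + s + 1 = n + (s + 1) by omega, ih]

lemma pvFlatMap_enumerate {α β : Type} (h : α → List β) (xs : List α) (s : Int) :
    (PySem.List.enumerate xs s).flatMap (fun p => h p.2) = xs.flatMap h := by
  induction xs generalizing s with
  | nil => rfl
  | cons x t ih => simp [PySem.List.enumerate_cons, ih]

-- the merge, on tagged-and-positioned blocks
def pvMergeE : List (Int × (Int × Int × List (String × Int))) →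
    List (Int × (Int × Int × List (String × Int))) → List (Int × (Int × Int × List (String × Int)))
  | [], cs => cs
  | f :: fs, cs =>
      cs.takeWhile (fun c => decide (c.2.1 < f.2.1)) ++
        f :: pvMergeE fs (cs.dropWhile (fun c => decide (c.2.1 < f.2.1)))

lemma pvMergeE_perm : ∀ fs cs, (pvMergeE fs cs).Perm (fs ++ cs) := by
  intro fs
  induction fs with
  | nil => intro cs; simp [pvMergeE]
  | cons f fs ih =>
    intro cs
    simp only [pvMergeE]
    set T := cs.takeWhile (fun c => decide (c.2.1 < f.2.1)) with hT
    set D := cs.dropWhile (fun c => decide (c.2.1 < f.2.1)) with hD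
    have hcs : T ++ D = cs := List.takeWhile_append_dropWhile
    have p1 : (T ++ f :: pvMergeE fs D).Perm (T ++ f :: (fs ++ D)) :=
      List.Perm.append_left T ((ih D).cons f)
    have p2 : (T ++ f :: (fs ++ D)).Perm (f :: (T ++ (fs ++ D))) := List.perm_middle
    have p3 : (T ++ (fs ++ D)).Perm (fs ++ (T ++ D)) := by
      rw [← List.append_assoc, ← List.append_assoc]
      exact (List.perm_append_comm).append_right D
    have he : f :: (fs ++ (T ++ D)) = (f :: fs) ++ cs := by rw [hcs]; rfl
    exact ((p1.trans p2).trans (p3.cons f)).trans (he ▸ List.Perm.refl _)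

lemma pvKZ_lt_iff (a b : Int × (Int × Int × List (String × Int))) :
    pvKZ a < pvKZ b ↔ a.2.1 < b.2.1 ∨ (a.2.1 = b.2.1 ∧ a.1 < b.1) := Prod.Lex.toLex_lt_toLex

lemma pvDropWhile_ge (v : Int) : ∀ cs : List (Int × (Int × Int × List (String × Int))),
    cs.Pairwise (fun a b => pvKZ a < pvKZ b) →
    ∀ x ∈ cs.dropWhile (fun c => decide (c.2.1 < v)), ¬ x.2.1 < v := by
  intro cs
  induction cs with
  | nil => simp
  | cons c t ih =>
    intro hp x hx
    obtain ⟨hc, ht⟩ := List.pairwise_cons.mp hp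
    by_cases h : c.2.1 < v
    · rw [List.dropWhile_cons] at hx
      simp only [h, decide_true, if_true] at hx
      exact ih ht x hx
    · rw [List.dropWhile_cons] at hx
      simp only [h, decide_false] at hx
      rcases List.mem_cons.mp hx with rfl | hx'
      · exact h
      · have h1 := hc x hx'
        rcases (pvKZ_lt_iff ..).mp h1 with h2 | h2 <;> omega

lemma pvMergeE_pairwise : ∀ fs cs,
    fs.Pairwise (fun a b => pvKZ a < pvKZ b) →
    cs.Pairwise (fun a b => pvKZ a < pvKZ b) →
    (∀ f ∈ fs, ∀ c ∈ cs, (c.2.1 < f.2.1 → pvKZ c < pvKZ f) ∧ (¬ c.2.1 < f.2.1 → pvKZ f < pvKZ c)) →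
    (pvMergeE fs cs).Pairwise (fun a b => pvKZ a < pvKZ b) := by
  intro fs
  induction fs with
  | nil => intro cs _ hcs _; simpa [pvMergeE] using hcs
  | cons f fs ih =>
    intro cs hfs hcs hx
    obtain ⟨hf1, hfs'⟩ := List.pairwise_cons.mp hfs
    simp only [pvMergeE]
    set T := cs.takeWhile (fun c => decide (c.2.1 < f.2.1)) with hT
    set D := cs.dropWhile (fun c => decide (c.2.1 < f.2.1)) with hD
    have hTDeq : cs = T ++ D := List.takeWhile_append_dropWhile.symm
    have hmemT : ∀ a ∈ T, a ∈ cs := fun a ha => (List.takeWhile_sublist _).subset ha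
    have hmemD : ∀ a ∈ D, a ∈ cs := fun a ha => (List.dropWhile_sublist _).subset ha
    have hpredT : ∀ a ∈ T, a.2.1 < f.2.1 := fun a ha => by
      simpa using List.mem_takeWhile_imp ha
    obtain ⟨pT, pD, cTD⟩ := List.pairwise_append.mp (hTDeq ▸ hcs)
    have hgeD : ∀ x ∈ D, ¬ x.2.1 < f.2.1 := fun x hx' => pvDropWhile_ge _ cs hcs x hx'
    have hIH := ih D hfs' pD
      (fun f' hf' c hc => hx f' (List.mem_cons_of_mem _ hf') c (hmemD c hc))
    have hmem_merge : ∀ x ∈ pvMergeE fs D, x ∈ fs ∨ x ∈ D := fun x hx' => by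
      have := (pvMergeE_perm fs D).mem_iff.mp hx'
      simpa using this
    refine List.pairwise_append.mpr ⟨pT, ?_, ?_⟩
    · refine List.pairwise_cons.mpr ⟨?_, hIH⟩
      intro x hx'
      rcases hmem_merge x hx' with h | h
      · exact hf1 x h
      · exact (hx f (List.mem_cons_self ..) x (hmemD x h)).2 (hgeD x h)
    · intro a ha b hb
      rcases List.mem_cons.mp hb with rfl | hb'
      · exact (hx b (List.mem_cons_self ..) a (hmemT a ha)).1 (hpredT a ha)
      · rcases hmem_merge b hb' with h | h
        · have h1 := hf1 b h
          have h2 : f.2.1 ≤ b.2.1 := by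
            rcases (pvKZ_lt_iff ..).mp h1 with h3 | h3 <;> omega
          exact (hx b (List.mem_cons_of_mem _ h) a (hmemT a ha)).1
            (lt_of_lt_of_le (hpredT a ha) h2)
        · exact cTD a ha b h

lemma pvInnerA_eq (v : Int) : ∀ (cs : List (Int × List (String × Int))) acc,
    pvInnerA v cs acc =
      (acc ++ (cs.takeWhile (fun c => decide (pvY c.2 < v))).map Prod.snd,
       cs.dropWhile (fun c => decide (pvY c.2 < v))) := by
  intro cs
  induction cs with
  | nil => intro acc; simp [pvInnerA]
  | cons c t ih =>
    intro acc
    by_cases hc : pvY c.2 < v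
    · simp [pvInnerA, hc, ih]
    · simp [pvInnerA, hc]

lemma pvOuterA_eq : ∀ (fs : List (Int × List (String × Int)))
    (cs : List (Int × (Int × List (String × Int)))) acc,
    pvOuterA (fs.map Prod.snd) (cs.map (fun p => p.2)) acc =
      acc ++ (pvMergeE (fs.map (fun p => (p.1, (pvY p.2, (0:Int), p.2))))
        (cs.map (fun p => (p.1, (pvY p.2.2, (1:Int), p.2.2))))).map (fun e => e.2.2.2) := by
  intro fs
  induction fs with
  | nil =>
    intro cs acc
    simp only [List.map_nil, pvOuterA, pvMergeE]
    rw [PySem.List.foldl_append_singleton_eq_map]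
    simp [List.map_map, Function.comp]
  | cons f fs ih =>
    intro cs acc
    simp only [List.map_cons, pvOuterA, pvInnerA_eq, pvMergeE]
    rw [List.takeWhile_map, List.dropWhile_map]
    have hdw : (cs.dropWhile ((fun c => decide (pvY c.2 < pvY f.2)) ∘ (fun p => p.2))).map
        (fun p => p.2) = (cs.dropWhile (fun p => decide (pvY p.2.2 < pvY f.2))).map
        (fun p => p.2) := rfl
    rw [hdw, ih]
    rw [List.takeWhile_map, List.dropWhile_map]
    simp only [Function.comp_def, List.map_map, List.map_append, List.map_cons,
      List.append_assoc, List.singleton_append]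

lemma pvPairwise_of_forall {α : Type} {R : α → α → Prop} (h : ∀ a b, R a b) :
    ∀ l : List α, l.Pairwise R := by
  intro l; induction l with
  | nil => exact List.Pairwise.nil
  | cons x t ih => exact List.pairwise_cons.mpr ⟨fun b _ => h x b, ih⟩

lemma pvAllCol_eq (colsS : List (List (List (String × Int)))) :
    (PySem.List.enumerate colsS 0).foldl
        (fun acc p => p.2.foldl (fun a b => a ++ [(p.1, b)]) acc) [] =
      (PySem.List.enumerate colsS 0).flatMap (fun p => p.2.map (fun b => (p.1, b))) := by
  have h : (fun (acc : List (Int × List (String × Int))) (p : Int × List (List (String × Int))) =>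
      p.2.foldl (fun a b => a ++ [(p.1, b)]) acc)
      = fun acc p => acc ++ p.2.map (fun b => (p.1, b)) := by
    funext acc p; exact PySem.List.foldl_append_singleton_eq_map ..
  rw [h, PySem.List.foldl_append_eq_flatMap, List.nil_append]

lemma pvAllCol_pairwise (colsS : List (List (List (String × Int)))) :
    ((PySem.List.enumerate colsS 0).flatMap (fun p => p.2.map (fun b => (p.1, b)))).Pairwise
      (fun a b => a.1 ≤ b.1) := by
  rw [List.flatMap_def]
  refine List.pairwise_flatten.mpr ⟨?_, ?_⟩
  · intro l hl
    obtain ⟨p, _, rfl⟩ := List.mem_map.mp hl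
    exact List.pairwise_map.mpr (pvPairwise_of_forall (fun a b => le_refl p.1) _)
  · refine List.pairwise_map.mpr ((PySem.List.pairwise_lt_enumerate colsS 0).imp ?_)
    intro p q hpq a ha b hb
    obtain ⟨a0, _, rfl⟩ := List.mem_map.mp ha
    obtain ⟨b0, _, rfl⟩ := List.mem_map.mp hb
    exact le_of_lt hpq

lemma pvTagC_eq (colsS : List (List (List (String × Int)))) :
    colsS.flatMap (fun col => col.map (fun b => (pvY b, (1:Int), b)))
      = ((PySem.List.enumerate colsS 0).flatMap (fun p => p.2.map (fun b => (p.1, b)))).map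
          (fun q => (pvY q.2, (1:Int), q.2)) := by
  rw [List.map_flatMap]
  simp only [List.map_map, Function.comp_def]
  exact (pvFlatMap_enumerate (fun col => col.map (fun b => (pvY b, (1:Int), b))) colsS 0).symm

lemma pvSortedTagged_eq (F : List (List (String × Int))) (colsS : List (List (List (String × Int))))
    (hF : F.Pairwise (fun a b => pvY a ≤ pvY b)) :
    PySem.List.sorted
        (PySem.List.enumerate (F.map (fun b => (pvY b, (0:Int), b)) ++
          colsS.flatMap (fun col => col.map (fun b => (pvY b, (1:Int), b)))) 0)
        (fun p => (toLex (p.2.1, p.1) : Int ×ₗ Int))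
      = pvMergeE ((PySem.List.enumerate F 0).map (fun p => (p.1, (pvY p.2, (0:Int), p.2))))
          ((PySem.List.sorted
              (PySem.List.enumerate
                ((PySem.List.enumerate colsS 0).flatMap (fun p => p.2.map (fun b => (p.1, b)))) 0)
              (fun p => (toLex (pvY p.2.2, p.1) : Int ×ₗ Int))).map
            (fun p => (p.1 + (F.length : Int), (pvY p.2.2, (1:Int), p.2.2)))) := by
  set A2 := (PySem.List.enumerate colsS 0).flatMap (fun p => p.2.map (fun b => (p.1, b))) with hA2
  set DA := PySem.List.sorted (PySem.List.enumerate A2 0)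
    (fun p => (toLex (pvY p.2.2, p.1) : Int ×ₗ Int)) with hDA
  set W1 := (PySem.List.enumerate F 0).map (fun p => (p.1, (pvY p.2, (0:Int), p.2))) with hW1
  set W2 := DA.map (fun p => (p.1 + (F.length : Int), (pvY p.2.2, (1:Int), p.2.2))) with hW2
  apply PySem.List.sorted_eq_of_perm_of_pairwise_lt
  · -- permutation
    refine (pvMergeE_perm W1 W2).trans ?_
    rw [PySem.List.enumerate_append]
    refine List.Perm.append ?_ ?_
    · rw [pvEnumerate_map]
    · rw [pvTagC_eq colsS, ← hA2, pvEnumerate_map]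
      have hlen : (0 : Int) + ((F.map (fun b => (pvY b, (0:Int), b))).length : Int)
          = (F.length : Int) + 0 := by simp
      rw [hlen, pvEnumerate_shift, List.map_map]
      have hp := (PySem.List.sorted_perm (PySem.List.enumerate A2 0)
        (fun p => (toLex (pvY p.2.2, p.1) : Int ×ₗ Int)) false).map
        (fun p => (p.1 + (F.length : Int), (pvY p.2.2, (1:Int), p.2.2)))
      refine hp.trans ?_
      simp only [Function.comp_def]
      exact List.Perm.refl _
  · -- strict pairwise of the merged list
    refine pvMergeE_pairwise W1 W2 ?_ ?_ ?_
    · refine List.pairwise_map.mpr ?_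
      have hY : (PySem.List.enumerate F 0).Pairwise (fun p q => pvY p.2 ≤ pvY q.2) :=
        (List.pairwise_map (l := PySem.List.enumerate F 0) (f := fun x => x.2)
          (R := fun a b => pvY a ≤ pvY b)).mp
          (by rw [PySem.List.map_snd_enumerate F 0]; exact hF)
      refine (hY.and (PySem.List.pairwise_lt_enumerate F 0)).imp ?_
      intro p q h
      obtain ⟨h1, h2⟩ := h
      refine (pvKZ_lt_iff ..).mpr ?_
      dsimp only
      omega
    · refine List.pairwise_map.mpr ?_
      refine (pvSorted_enum_strict (fun x => pvY x.2) A2).imp ?_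
      intro p q h
      rw [Prod.Lex.toLex_lt_toLex] at h
      refine (pvKZ_lt_iff ..).mpr ?_
      simp only at h ⊢
      omega
    · intro f hf c hc
      obtain ⟨p, hp, rfl⟩ := List.mem_map.mp hf
      obtain ⟨q, hq, rfl⟩ := List.mem_map.mp hc
      obtain ⟨k, hk, rfl⟩ := (PySem.List.mem_enumerate_iff F 0 p).mp hp
      have hq0 : 0 ≤ q.1 := by
        have hq' := (PySem.List.sorted_perm (PySem.List.enumerate A2 0)
          (fun p => (toLex (pvY p.2.2, p.1) : Int ×ₗ Int)) false).mem_iff.mp hq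
        obtain ⟨m, hm, rfl⟩ := (PySem.List.mem_enumerate_iff A2 0 q).mp hq'
        simp
      constructor <;> intro h <;> refine (pvKZ_lt_iff ..).mpr ?_ <;> simp only at h ⊢ <;> omega

theorem sort_reading_order_py_spec : Claim_equal_sort_reading_order_py := by
  intro fw cb _ _
  unfold Spec_sort_reading_order_py sort_reading_order_py sort_reading_order_py_alt
  by_cases hfw : PySem.List.sorted fw pvY = []
  · simp only [hfw, reduceIte]
    rw [PySem.List.foldl_append_eq_flatten, List.nil_append]
    rw [List.flatMap_def, List.map_id']
  · simp only [if_neg hfw]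
    have htag2 : (List.map (fun b => (pvY b, (0:Int), b)) (PySem.List.sorted fw pvY) ++
        (cb.map (fun col => PySem.List.sorted col pvY)).flatMap
          (fun col => col.map (fun b => (pvY b, (1:Int), b)))).Pairwise
        (fun a b => a.2.1 ≤ b.2.1) := by
      refine List.pairwise_append.mpr ⟨?_, ?_, ?_⟩
      · exact List.pairwise_map.mpr (pvPairwise_of_forall (fun a b => le_refl (0:Int)) _)
      · refine (pvPairwise_of_forall (fun a b => trivial) _ :
          List.Pairwise (fun _ _ => True) _).imp_of_mem ?_
        intro a b ha hb _
        obtain ⟨cola, _, hca⟩ := List.mem_flatMap.mp ha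
        obtain ⟨a0, _, rfl⟩ := List.mem_map.mp hca
        obtain ⟨colb, _, hcb⟩ := List.mem_flatMap.mp hb
        obtain ⟨b0, _, rfl⟩ := List.mem_map.mp hcb
        exact le_refl (1:Int)
      · intro a ha b hb
        obtain ⟨a0, _, rfl⟩ := List.mem_map.mp ha
        obtain ⟨colb, _, hcb⟩ := List.mem_flatMap.mp hb
        obtain ⟨b0, _, rfl⟩ := List.mem_map.mp hcb
        exact zero_le_one
    rw [pvAllCol_eq,
        pvSorted2_char (fun x : Int × List (String × Int) => pvY x.2)
          (fun x : Int × List (String × Int) => x.1) _ (pvAllCol_pairwise _),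
        pvSorted2_char (fun t : Int × Int × List (String × Int) => t.1)
          (fun t : Int × Int × List (String × Int) => t.2.1) _ htag2,
        pvSortedTagged_eq (PySem.List.sorted fw pvY)
          (cb.map (fun col => PySem.List.sorted col pvY)) (PySem.List.sorted_pairwise fw pvY),
        List.map_map]
    have hout := pvOuterA_eq (PySem.List.enumerate (PySem.List.sorted fw pvY) 0)
      ((PySem.List.sorted (PySem.List.enumerate
          ((PySem.List.enumerate (cb.map (fun col => PySem.List.sorted col pvY)) 0).flatMap
            (fun p => p.2.map (fun b => (p.1, b)))) 0)
        (fun p => (toLex (pvY p.2.2, p.1) : Int ×ₗ Int))).map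
        (fun p => (p.1 + (((PySem.List.sorted fw pvY).length : Nat) : Int), p.2))) []
    have e1 : List.map Prod.snd (PySem.List.enumerate (PySem.List.sorted fw pvY) 0)
        = PySem.List.sorted fw pvY := PySem.List.map_snd_enumerate _ 0
    rw [e1, List.nil_append, List.map_map, List.map_map] at hout
    exact hout
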